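-- pv_equiv track=rewrite | github.com/farqlia/AI-and-Data-Engineering | ai_data_eng/tabu_search/evaluate.py | get_matched_stops
-- ===== SOURCE A (Python) =====
-- from typing import List
--
-- def get_matched_stops(solution, visiting_stops: List[str]):
--     visiting_stops = set(visiting_stops)
--     matched_stops = 0
--     for conn in solution:
--         if conn['start_stop'] in visiting_stops:
--             visiting_stops.remove(conn['start_stop'])
--             matched_stops += 1
--     return matched_stops, visiting_stops
-- ===== SOURCE B (Python) =====
-- def get_matched_stops(solution, visiting_stops):
--     visiting_set = set(visiting_stops)
--     starts = {conn['start_stop'] for conn in solution}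
--     matched = visiting_set & starts
--     return len(matched), visiting_set - matched
-- ===== Notes on version B (the rewrite author's own statement) =====
-- stated objective: simpler
-- what changed: Replaces the incremental loop that shrinks the visiting set and bumps a counter per connection with one set comprehension of start stops followed by set intersection (the count) and set difference (the remainder).
import Mathlib
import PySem

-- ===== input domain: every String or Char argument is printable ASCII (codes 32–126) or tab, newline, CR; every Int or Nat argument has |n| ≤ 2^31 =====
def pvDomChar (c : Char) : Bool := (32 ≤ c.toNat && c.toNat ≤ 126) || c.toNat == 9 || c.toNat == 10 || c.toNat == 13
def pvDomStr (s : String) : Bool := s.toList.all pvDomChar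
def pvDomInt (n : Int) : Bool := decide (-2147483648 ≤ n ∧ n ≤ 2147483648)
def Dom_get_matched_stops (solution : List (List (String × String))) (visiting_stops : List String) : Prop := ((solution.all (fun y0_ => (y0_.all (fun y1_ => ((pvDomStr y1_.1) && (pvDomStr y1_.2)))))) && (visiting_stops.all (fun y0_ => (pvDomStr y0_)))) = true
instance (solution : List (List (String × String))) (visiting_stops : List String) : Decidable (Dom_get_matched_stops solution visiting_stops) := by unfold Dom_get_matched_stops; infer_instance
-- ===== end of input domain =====

-- B replaces A's incremental shrink-the-set-and-count loop by a set comprehension of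
-- start stops plus set intersection (the count) and set difference (the remainder): simpler.


-- ===== PORT A =====
def get_matched_stops (solution : List (List (String × String))) (visiting_stops : List String) : Int × List String :=
  solution.foldl (fun st conn =>
    match PySem.Dict.get? ⟨conn⟩ "start_stop" with
    | none => st      -- Python raises KeyError here; excluded by Pre_
    | some s =>
        if PySem.Set.contains st.2 s then
          (st.1 + 1, (PySem.Set.remove? st.2 s).getD st.2)
        else st)
    ((0 : Int), PySem.Set.ofList visiting_stops)

-- ===== PORT B =====
def get_matched_stops_alt (solution : List (List (String × String))) (visiting_stops : List String) : Int × List String :=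
  let visiting_set : PySem.Set String := PySem.Set.ofList visiting_stops
  -- {conn['start_stop'] for conn in solution}; a missing key raises KeyError in Python (excluded by Pre_)
  let starts : PySem.Set String := PySem.Set.ofList (solution.map (fun conn => (PySem.Dict.get? ⟨conn⟩ "start_stop").getD ""))
  let matched : PySem.Set String := PySem.Set.inter visiting_set starts
  (((matched.length : Nat) : Int), PySem.Set.diff visiting_set matched)

-- ===== PRECONDITION & SPEC =====
-- Pre_ excludes exactly the inputs where some connection dict has no 'start_stop' key:
-- there both A and B raise KeyError.
def Pre_get_matched_stops (solution : List (List (String × String))) (_visiting_stops : List String) : Prop :=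
  ∀ conn ∈ solution, (PySem.Dict.get? ⟨conn⟩ "start_stop").isSome = true
instance (solution : List (List (String × String))) (visiting_stops : List String) : Decidable (Pre_get_matched_stops solution visiting_stops) := by unfold Pre_get_matched_stops; infer_instance

def pvWitness_get_matched_stops : (List (List (String × String))) × List String :=
  ([[("start_stop", "A"), ("end_stop", "B")], [("start_stop", "C")]], ["A", "D", "A"])

def Spec_get_matched_stops (solution : List (List (String × String))) (visiting_stops : List String) (out : Int × List String) : Prop := out = get_matched_stops_alt solution visiting_stops
instance (solution : List (List (String × String))) (visiting_stops : List String) (out : Int × List String) : Decidable (Spec_get_matched_stops solution visiting_stops out) := by unfold Spec_get_matched_stops; infer_instance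

-- ===== CLAIM (what is proved, stated in full; the proofs are below) =====
def Claim_equal_get_matched_stops : Prop := ∀ (solution : List (List (String × String))) (visiting_stops : List String), Dom_get_matched_stops solution visiting_stops → Pre_get_matched_stops solution visiting_stops → Spec_get_matched_stops solution visiting_stops (get_matched_stops solution visiting_stops)

-- ===== LEMMAS AND PROOFS =====

-- A's loop, characterised: starting from a duplicate-free set V it returns the count
-- |V| - |V \ starts| and the set V \ starts, where starts are the start stops of l.
lemma loopA_char (l : List (List (String × String))) (V : List String) (c : Int)
    (hnd : V.Nodup)
    (hpre : ∀ conn ∈ l, (PySem.Dict.get? ⟨conn⟩ "start_stop").isSome = true) :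
    l.foldl (fun st conn =>
      match PySem.Dict.get? ⟨conn⟩ "start_stop" with
      | none => st
      | some s =>
          if PySem.Set.contains st.2 s then
            (st.1 + 1, (PySem.Set.remove? st.2 s).getD st.2)
          else st) (c, V)
    = (c + (V.length : Int)
         - ((V.filter (fun x => !(l.map (fun conn => (PySem.Dict.get? ⟨conn⟩ "start_stop").getD "")).contains x)).length : Int),
       V.filter (fun x => !(l.map (fun conn => (PySem.Dict.get? ⟨conn⟩ "start_stop").getD "")).contains x)) := by
  induction l generalizing V c with
  | nil => simp
  | cons conn t ih =>
    obtain ⟨s, hs⟩ := Option.isSome_iff_exists.mp (hpre conn (List.mem_cons_self))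
    have hpre' : ∀ c' ∈ t, (PySem.Dict.get? ⟨c'⟩ "start_stop").isSome = true :=
      fun c' hc' => hpre c' (List.mem_cons_of_mem _ hc')
    simp only [List.foldl_cons, List.map_cons, hs, Option.getD_some]
    by_cases hmem : s ∈ V
    · have hcon : PySem.Set.contains V s = true := by
        simpa [PySem.Set.contains, List.contains_iff_mem] using hmem
      have hstep : (if PySem.Set.contains V s = true then
            (c + 1, (PySem.Set.remove? V s).getD V) else (c, V)) = (c + 1, PySem.Set.discard V s) := by
        simp [PySem.Set.remove?, hmem]
      rw [hstep]
      have hnd' : (PySem.Set.discard V s).Nodup := List.Nodup.filter _ hnd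
      rw [ih _ _ hnd' hpre']
      -- the remaining-set filters coincide
      have hset : (PySem.Set.discard V s).filter
            (fun x => !(t.map (fun conn => (PySem.Dict.get? ⟨conn⟩ "start_stop").getD "")).contains x)
          = V.filter (fun x => !((s :: t.map (fun conn => (PySem.Dict.get? ⟨conn⟩ "start_stop").getD "")).contains x)) := by
        simp only [PySem.Set.discard, List.filter_filter]
        apply List.filter_congr
        intro x _
        by_cases hxs : x = s
        · simp [hxs]
        · simp [hxs, Bool.and_comm]
      -- |discard V s| = |V| - 1
      have hlen : (PySem.Set.discard V s).length + 1 = V.length := by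
        have h1 := (List.length_eq_length_filter_add (l := V) (fun y => !(y == s))).symm
        have h2 : (V.filter (fun y => !!(y == s))) = [s] := by
          have : (V.filter (fun y => !!(y == s))) = V.filter (fun y => y == s) := by
            simp
          rw [this]
          have hc : (V.filter (fun y => y == s)).length = V.count s :=
            Eq.symm List.count_eq_length_filter
          have hone : V.count s = 1 := List.count_eq_one_of_mem hnd hmem
          have hall : ∀ y ∈ V.filter (fun y => y == s), y = s := by
            intro y hy
            simpa using (List.of_mem_filter hy)
          cases hfe : V.filter (fun y => y == s) with
          | nil => rw [hfe] at hc; rw [hone] at hc; simp at hc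
          | cons a l2 =>
            have ha : a = s := hall a (hfe ▸ List.mem_cons_self)
            have : l2 = [] := by
              rw [hfe, hone] at hc
              simpa using List.length_eq_zero_iff.mp (by simpa using hc.symm)
            simp [ha, this]
        rw [h2] at h1
        simpa [PySem.Set.discard] using h1
      rw [hset]
      refine Prod.ext ?_ rfl
      simp only
      have : ((PySem.Set.discard V s).length : Int) = (V.length : Int) - 1 := by
        omega
      rw [this]; ring
    · have hcon : PySem.Set.contains V s = false := by
        simp [PySem.Set.contains, hmem]
      have hstep : (if PySem.Set.contains V s = true then
            (c + 1, (PySem.Set.remove? V s).getD V) else (c, V)) = (c, V) := by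
        simp [hmem]
      rw [hstep]
      rw [ih _ _ hnd hpre']
      have hset : V.filter
            (fun x => !(t.map (fun conn => (PySem.Dict.get? ⟨conn⟩ "start_stop").getD "")).contains x)
          = V.filter (fun x => !((s :: t.map (fun conn => (PySem.Dict.get? ⟨conn⟩ "start_stop").getD "")).contains x)) := by
        apply List.filter_congr
        intro x hx
        have : x ≠ s := fun h => hmem (h ▸ hx)
        simp [this, eq_comm]
      rw [hset]

-- contains on an ofList set agrees with contains on the underlying list
lemma contains_ofList_eq (xs : List String) (x : String) :
    PySem.Set.contains (PySem.Set.ofList xs) x = xs.contains x := by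
  by_cases h : x ∈ xs <;>
    simp [PySem.Set.contains, PySem.Set.mem_ofList, h]

-- ===== VERDICT (by name: the statement is the Claim_ definition above) =====
theorem get_matched_stops_spec : Claim_equal_get_matched_stops := by
  intro solution visiting_stops _ hpre
  unfold Spec_get_matched_stops get_matched_stops get_matched_stops_alt
  dsimp only
  rw [loopA_char solution (PySem.Set.ofList visiting_stops) 0 (PySem.Set.nodup_ofList visiting_stops) hpre]
  set V : List String := PySem.Set.ofList visiting_stops with hV
  set starts : List String := solution.map (fun conn => (PySem.Dict.get? ⟨conn⟩ "start_stop").getD "") with hstarts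
  have hmatched : PySem.Set.inter V (PySem.Set.ofList starts) = V.filter (fun x => starts.contains x) := by
    simp only [PySem.Set.inter]
    apply List.filter_congr
    intro x _
    exact contains_ofList_eq starts x
  have hdiff : PySem.Set.diff V (V.filter (fun x => starts.contains x))
      = V.filter (fun x => !starts.contains x) := by
    simp only [PySem.Set.diff]
    apply List.filter_congr
    intro x hx
    by_cases h : starts.contains x = true <;>
      simp [PySem.Set.contains, List.mem_filter, hx]
  rw [hmatched, hdiff]
  refine Prod.ext ?_ rfl
  simp only
  have hsum := (List.length_eq_length_filter_add (l := V) (fun x => starts.contains x))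
  omega
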